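-- pv_equiv track=rewrite | github.com/webis-de/argmining25-argument-segmentation | src/segment_boundary_evaluation.py | collect_preds_in_gts
-- ===== SOURCE A (Python) =====
-- def collect_preds_in_gts(gtbounds, pbounds):
--     '''
--     For all gt_seg of an argument:
--     list index of all pred_segs that contain at least one boundary of the gt_seg
--     '''
--
--     preds_in_gts = {}
--     for i, gb in enumerate(gtbounds):
--         contained_in_pred = []
--         for j, pb in enumerate(pbounds):
--             # start and/or end of pred_seg is contained in gt_seg
--             if between(pb[0], gb[0], gb[1]) or between(pb[1], gb[0], gb[1]):
--                 contained_in_pred.append(j)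
--         preds_in_gts[i] = contained_in_pred
--     return preds_in_gts
--
-- def between(check, lower, upper):
--     '''Verify if index 'check' is between segment boundaries 'lower' and 'upper' (ints)'''
--     return check >= lower and check <= upper
-- ===== SOURCE B (Python) =====
-- def collect_preds_in_gts(gtbounds, pbounds):
--     '''
--     For all gt_seg of an argument:
--     list index of all pred_segs that contain at least one boundary of the gt_seg
--     '''
--     buckets = [[] for _ in gtbounds]
--     for j, (ps, pe) in enumerate(pbounds):
--         buckets = [b + [j] if gs <= ps <= ge or gs <= pe <= ge else b
--                    for b, (gs, ge) in zip(buckets, gtbounds)]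
--     return dict(enumerate(buckets))
-- ===== Notes on version B (the rewrite author's own statement) =====
-- stated objective: alternative
-- what changed: B transposes the traversal: a single outer pass over the predicted segments updates per-gt buckets via a zip comprehension (no dict built incrementally, no per-gt inner rescan structure), then enumerates the buckets; same quadratic cost, different loop structure and state.
import Mathlib
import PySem

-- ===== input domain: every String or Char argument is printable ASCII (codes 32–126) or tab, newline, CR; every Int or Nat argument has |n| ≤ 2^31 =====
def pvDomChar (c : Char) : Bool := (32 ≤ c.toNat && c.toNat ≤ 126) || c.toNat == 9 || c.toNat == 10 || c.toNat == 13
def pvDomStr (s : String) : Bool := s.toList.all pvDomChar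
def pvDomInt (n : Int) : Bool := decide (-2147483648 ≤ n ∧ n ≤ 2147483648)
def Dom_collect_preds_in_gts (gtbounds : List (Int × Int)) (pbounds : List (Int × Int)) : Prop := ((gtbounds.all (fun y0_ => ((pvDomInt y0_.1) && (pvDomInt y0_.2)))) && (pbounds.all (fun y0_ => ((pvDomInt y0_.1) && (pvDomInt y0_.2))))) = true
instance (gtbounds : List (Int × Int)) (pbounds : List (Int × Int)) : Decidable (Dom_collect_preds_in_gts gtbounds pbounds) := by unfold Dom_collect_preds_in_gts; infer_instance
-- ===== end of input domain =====

-- B transposes the traversal (one outer pass over preds updating per-gt buckets); equivalence is on the return value; same cost class.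

-- ===== PORT A =====
def pybetween (check lower upper : Int) : Bool := check ≥ lower && check ≤ upper

def collect_preds_in_gts (gtbounds : List (Int × Int)) (pbounds : List (Int × Int)) : List (Int × List Int) :=
  let d := (PySem.List.enumerate gtbounds).foldl
    (fun (d : PySem.Dict Int (List Int)) igb =>
      let contained := (PySem.List.enumerate pbounds).foldl
        (fun (acc : List Int) jpb =>
          if pybetween jpb.2.1 igb.2.1 igb.2.2 || pybetween jpb.2.2 igb.2.1 igb.2.2
          then acc ++ [jpb.1] else acc) []
      d.insert igb.1 contained)
    PySem.Dict.empty
  d.items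

-- ===== PORT B =====
-- dict(enumerate(buckets)) has the distinct fresh keys 0..n-1, so its items list is exactly the enumerate list.
def collect_preds_in_gts_alt (gtbounds : List (Int × Int)) (pbounds : List (Int × Int)) : List (Int × List Int) :=
  let buckets := (PySem.List.enumerate pbounds).foldl
    (fun (bs : List (List Int)) jp =>
      List.zipWith (fun (b : List Int) (gb : Int × Int) =>
        if (gb.1 ≤ jp.2.1 && jp.2.1 ≤ gb.2) || (gb.1 ≤ jp.2.2 && jp.2.2 ≤ gb.2)
        then b ++ [jp.1] else b)
        bs gtbounds)
    (gtbounds.map (fun _ => ([] : List Int)))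
  PySem.List.enumerate buckets

-- ===== PRECONDITION & SPEC =====
def Spec_collect_preds_in_gts (gtbounds : List (Int × Int)) (pbounds : List (Int × Int)) (out : List (Int × List Int)) : Prop := out = collect_preds_in_gts_alt gtbounds pbounds
instance (gtbounds : List (Int × Int)) (pbounds : List (Int × Int)) (out : List (Int × List Int)) : Decidable (Spec_collect_preds_in_gts gtbounds pbounds out) := by unfold Spec_collect_preds_in_gts; infer_instance

-- ===== CLAIM (what is proved, stated in full; the proofs are below) =====
def Claim_equal_collect_preds_in_gts : Prop := ∀ (gtbounds : List (Int × Int)) (pbounds : List (Int × Int)), Dom_collect_preds_in_gts gtbounds pbounds → Spec_collect_preds_in_gts gtbounds pbounds (collect_preds_in_gts gtbounds pbounds)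

-- ===== LEMMAS AND PROOFS =====

-- zipWith over a mapped copy of the same list is a map
theorem zipWith_map_self {α β : Type} (g : β → α → β) (f : α → β) :
    ∀ (l : List α), List.zipWith g (l.map f) l = l.map (fun a => g (f a) a) := by
  intro l; induction l with
  | nil => rfl
  | cons x xs ih => simp [ih]

-- B's outer fold acts pointwise on the buckets
theorem foldl_zipWith_map {α β γ : Type} (g : γ → β → α → β)
    (ps : List γ) (gts : List α) (f : α → β) :
    ps.foldl (fun bs jp => List.zipWith (fun b gb => g jp b gb) bs gts) (gts.map f)
      = gts.map (fun gb => ps.foldl (fun b jp => g jp b gb) (f gb)) := by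
  induction ps generalizing f with
  | nil => rfl
  | cons jp ps ih =>
      simp only [List.foldl_cons]
      rw [zipWith_map_self (fun b gb => g jp b gb) f gts, ih (fun gb => g jp (f gb) gb)]

theorem enumerate_map {α β : Type} (h : α → β) :
    ∀ (l : List α) (s : Int),
      PySem.List.enumerate (l.map h) s
        = (PySem.List.enumerate l s).map (fun p => (p.1, h p.2)) := by
  intro l; induction l with
  | nil => intro s; rfl
  | cons x xs ih => intro s; simp [PySem.List.enumerate_cons, ih]

theorem enumerate_fst_nodup {α : Type} (l : List α) (s : Int) :
    ((PySem.List.enumerate l s).map (·.1)).Nodup := by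
  have h := PySem.List.pairwise_lt_enumerate (xs := l) (s := s)
  have h2 : (List.map (fun p => p.1) (PySem.List.enumerate l s)).Pairwise (fun a b => a < b) :=
    List.Pairwise.map (S := fun a b => a < b) (fun (p : Int × α) => p.1) (fun _ _ hab => hab) h
  exact h2.imp (fun {a b} hlt => ne_of_lt hlt)

-- ===== VERDICT (by name: the statement is the Claim_ definition above) =====
theorem collect_preds_in_gts_spec : Claim_equal_collect_preds_in_gts := by
  intro gtbounds pbounds _
  show collect_preds_in_gts gtbounds pbounds = collect_preds_in_gts_alt gtbounds pbounds
  unfold collect_preds_in_gts collect_preds_in_gts_alt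
  rw [PySem.Dict.items_foldl_insert_fresh
        (l := PySem.List.enumerate gtbounds)
        (k := fun igb => igb.1)
        (v := fun igb => (PySem.List.enumerate pbounds).foldl
          (fun (acc : List Int) jpb =>
            if pybetween jpb.2.1 igb.2.1 igb.2.2 || pybetween jpb.2.2 igb.2.1 igb.2.2
            then acc ++ [jpb.1] else acc) [])
        (d := PySem.Dict.empty)
        (by intro a _; rfl)
        (enumerate_fst_nodup gtbounds 0)]
  rw [foldl_zipWith_map
        (fun jp b (gb : Int × Int) =>
          if (gb.1 ≤ jp.2.1 && jp.2.1 ≤ gb.2) || (gb.1 ≤ jp.2.2 && jp.2.2 ≤ gb.2)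
          then b ++ [jp.1] else b)
        (PySem.List.enumerate pbounds) gtbounds (fun _ => ([] : List Int))]
  rw [enumerate_map]
  simp [pybetween, ge_iff_le, PySem.Dict.empty]
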